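-- pv_equiv track=rewrite | github.com/vholmer/adventofcode2024 | src/day4.py | check
-- ===== SOURCE A (Python) =====
-- xmas = "XMAS"
--
-- def within_bounds(m: list[str], pos_yx: tuple[int, int]) -> tuple[int, int]:
--     y, x = pos_yx
--
--     if x < 0 or x >= len(m):
--         return False
--
--     if y < 0 or y >= len(m):
--         return False
--
--     return True
--
-- def check(
--     m: list[str], origin_yx: tuple[int, int], direction_yx: tuple[int, int], token=xmas
-- ) -> bool:
--     cur_pos = origin_yx
--
--     for i in range(len(token)):
--         if not within_bounds(m, cur_pos):
--             return False
--
--         if m[cur_pos[0]][cur_pos[1]] == token[i]: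
--             cur_pos = (cur_pos[0] + direction_yx[0], cur_pos[1] + direction_yx[1])
--         else:
--             return False
--     return True
-- ===== SOURCE B (Python) =====
-- xmas = "XMAS"
--
-- def check(m, origin_yx, direction_yx, token=xmas):
--     n = len(m)
--     y0, x0 = origin_yx
--     dy, dx = direction_yx
--     positions = [(y0 + i * dy, x0 + i * dx) for i in range(len(token))]
--     if any(not (0 <= yy < n and 0 <= xx < n) for yy, xx in positions):
--         return False
--     candidate = ''.join(m[yy][xx] for yy, xx in positions)
--     return candidate == token
-- ===== Notes on version B (the rewrite author's own statement) =====
-- stated objective: alternative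
-- what changed: Replaced A's interleaved walk (bounds-check then char-compare per step, carrying a moving cursor) by a closed-form position list (origin + i*direction) followed by two separate passes: one all-in-bounds check, then a join of the grid characters and a single string comparison with the token.
-- outside the precondition, e.g. on check(['AB', 'C'], (0, 0), (1, 1), 'XY'): A returns False, B raises IndexError
import Mathlib
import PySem

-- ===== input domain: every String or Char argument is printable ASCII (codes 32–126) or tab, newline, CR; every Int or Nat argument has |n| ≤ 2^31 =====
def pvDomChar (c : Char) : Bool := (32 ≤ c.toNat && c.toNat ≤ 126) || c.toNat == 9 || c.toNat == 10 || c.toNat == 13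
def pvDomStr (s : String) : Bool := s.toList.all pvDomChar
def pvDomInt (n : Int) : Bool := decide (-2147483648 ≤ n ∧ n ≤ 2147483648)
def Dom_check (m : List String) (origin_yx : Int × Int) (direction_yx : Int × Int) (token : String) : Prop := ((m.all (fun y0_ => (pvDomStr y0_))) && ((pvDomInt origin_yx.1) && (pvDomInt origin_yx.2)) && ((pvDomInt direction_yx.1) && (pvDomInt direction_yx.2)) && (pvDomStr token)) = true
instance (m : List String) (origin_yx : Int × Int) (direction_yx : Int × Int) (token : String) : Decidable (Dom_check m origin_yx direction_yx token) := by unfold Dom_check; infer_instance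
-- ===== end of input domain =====

-- B replaces A's interleaved bounds-check/char-compare walk by a closed-form position list,
-- an all-in-bounds pass, then one joined-string comparison (objective: alternative decomposition).

-- ===== PORT A =====
def within_bounds (m : List String) (pos_yx : Int × Int) : Bool :=
  let y := pos_yx.1
  let x := pos_yx.2
  if x < 0 || x ≥ (m.length : Int) then false
  else if y < 0 || y ≥ (m.length : Int) then false
  else true

-- the for-loop over range(len(token)), state = cur_pos, early return on failure;
-- the 'none' branches are Python's IndexError on a short row (outside Pre_check)
def checkGo (m : List String) (direction_yx : Int × Int) :
    List Char → Int × Int → Bool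
  | [], _ => true
  | c :: rest, cur_pos =>
    if !(within_bounds m cur_pos) then false
    else
      match PySem.List.pyGet? m cur_pos.1 with
      | none => false
      | some row =>
        match PySem.Str.pyGet? row cur_pos.2 with
        | none => false
        | some ch =>
          if ch = c then
            checkGo m direction_yx rest (cur_pos.1 + direction_yx.1, cur_pos.2 + direction_yx.2)
          else false

def check (m : List String) (origin_yx : Int × Int) (direction_yx : Int × Int) (token : String) : Bool :=
  checkGo m direction_yx token.toList origin_yx

-- ===== PORT B =====
-- m[yy][xx] for an in-bounds position; the defaults are Python's IndexError on a short row (outside Pre_check)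
def cellD (m : List String) (p : Int × Int) : Char :=
  match PySem.List.pyGet? m p.1 with
  | none => ' '
  | some row => (PySem.Str.pyGet? row p.2).getD ' '

def check_alt (m : List String) (origin_yx : Int × Int) (direction_yx : Int × Int) (token : String) : Bool :=
  let n : Int := (m.length : Int)
  let positions : List (Int × Int) :=
    (List.range token.toList.length).map
      (fun (i : Nat) => (origin_yx.1 + (i : Int) * direction_yx.1, origin_yx.2 + (i : Int) * direction_yx.2))
  if positions.any (fun p => !(decide (0 ≤ p.1) && decide (p.1 < n) && decide (0 ≤ p.2) && decide (p.2 < n))) then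
    false
  else
    decide (String.ofList (positions.map (cellD m)) = token)

-- ===== PRECONDITION & SPEC =====
-- Pre_ excludes ragged grids on which the token's ray passes through an in-bounds position
-- (A's bound for BOTH coordinates is len(m)) whose row is too short to hold its x-index:
-- there A may raise IndexError (B raises there too), and it thereby also excludes some
-- inputs on which A happens to return False before reaching the short row.
def Pre_check (m : List String) (origin_yx : Int × Int) (direction_yx : Int × Int) (token : String) : Prop :=
  ∀ i : Nat, i < token.toList.length →
    (0 ≤ origin_yx.1 + (i : Int) * direction_yx.1 ∧
     origin_yx.1 + (i : Int) * direction_yx.1 < (m.length : Int) ∧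
     0 ≤ origin_yx.2 + (i : Int) * direction_yx.2 ∧
     origin_yx.2 + (i : Int) * direction_yx.2 < (m.length : Int)) →
    origin_yx.2 + (i : Int) * direction_yx.2 <
      ((m.getD (origin_yx.1 + (i : Int) * direction_yx.1).toNat "").toList.length : Int)
instance (m : List String) (origin_yx : Int × Int) (direction_yx : Int × Int) (token : String) : Decidable (Pre_check m origin_yx direction_yx token) := by unfold Pre_check; infer_instance

def pvWitness_check : List String × (Int × Int) × (Int × Int) × String :=
  (["MAS", "XSA", "AXM"], (0, 0), (1, 1), "MSM")

def Spec_check (m : List String) (origin_yx : Int × Int) (direction_yx : Int × Int) (token : String) (out : Bool) : Prop := out = check_alt m origin_yx direction_yx token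
instance (m : List String) (origin_yx : Int × Int) (direction_yx : Int × Int) (token : String) (out : Bool) : Decidable (Spec_check m origin_yx direction_yx token out) := by unfold Spec_check; infer_instance

-- ===== CLAIM (what is proved, stated in full; the proofs are below) =====
def Claim_equal_check : Prop := ∀ (m : List String) (origin_yx : Int × Int) (direction_yx : Int × Int) (token : String), Dom_check m origin_yx direction_yx token → Pre_check m origin_yx direction_yx token → Spec_check m origin_yx direction_yx token (check m origin_yx direction_yx token)

-- ===== LEMMAS AND PROOFS =====

def posList (o d : Int × Int) (k : Nat) : List (Int × Int) :=
  (List.range k).map (fun (i : Nat) => (o.1 + (i : Int) * d.1, o.2 + (i : Int) * d.2))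

def inB (n : Int) (p : Int × Int) : Bool :=
  decide (0 ≤ p.1) && decide (p.1 < n) && decide (0 ≤ p.2) && decide (p.2 < n)

lemma posList_succ (o d : Int × Int) (k : Nat) :
    posList o d (k + 1) = o :: posList (o.1 + d.1, o.2 + d.2) d k := by
  unfold posList
  simp only [List.range_succ_eq_map, List.map_cons, List.map_map, Nat.cast_zero, zero_mul,
    add_zero]
  congr 1
  apply List.map_congr_left
  intro i _
  simp only [Function.comp_apply, Nat.succ_eq_add_one, Nat.cast_add, Nat.cast_one,
    Prod.mk.injEq]
  constructor <;> ring

lemma within_eq_inB (m : List String) (p : Int × Int) :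
    within_bounds m p = inB (m.length : Int) p := by
  unfold within_bounds inB
  by_cases h1 : p.2 < 0 ∨ (m.length : Int) ≤ p.2
  · simp only [ge_iff_le]
    rcases h1 with h | h <;> simp [h]
  · rw [not_or, not_lt, not_le] at h1
    by_cases h2 : p.1 < 0 ∨ (m.length : Int) ≤ p.1
    · simp only [ge_iff_le]
      rcases h2 with h | h <;> simp [h1.1, h1.2, h]
    · rw [not_or, not_lt, not_le] at h2
      simp only [ge_iff_le]
      simp [h1.1, h1.2, h2.1, h2.2, not_le.mpr h1.2, not_le.mpr h2.2]

-- under the per-position safety hypothesis and in-bounds, both ports read the same character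
lemma cell_some (m : List String) (p : Int × Int)
    (hsafe : p.2 < ((m.getD p.1.toNat "").toList.length : Int))
    (hb : inB (m.length : Int) p = true) :
    ∃ row ch, PySem.List.pyGet? m p.1 = some row ∧ PySem.Str.pyGet? row p.2 = some ch ∧
      cellD m p = ch := by
  unfold inB at hb
  simp only [Bool.and_eq_true, decide_eq_true_eq] at hb
  obtain ⟨⟨⟨hy0, hyn⟩, hx0⟩, hxn⟩ := hb
  have hlt : p.1.toNat < m.length := by omega
  have hrow : PySem.List.pyGet? m p.1 = some m[p.1.toNat] :=
    PySem.List.pyGet?_eq_some_getElem m hy0 hyn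
  have hgetD : m.getD p.1.toNat "" = m[p.1.toNat] := List.getD_eq_getElem m "" hlt
  rw [hgetD] at hsafe
  obtain ⟨ch, hch⟩ : ∃ ch, PySem.Str.pyGet? m[p.1.toNat] p.2 = some ch := by
    rcases Option.eq_none_or_eq_some (PySem.Str.pyGet? m[p.1.toNat] p.2) with h | ⟨ch, h⟩
    · simp only [PySem.Str.pyGet?, PySem.Chars.pyGet?_eq_listPyGet?] at h
      rw [PySem.List.pyGet?_eq_none_iff] at h
      exact absurd (by unfold PySem.Raise.InRange; omega) h
    · exact ⟨ch, h⟩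
  refine ⟨m[p.1.toNat], ch, hrow, hch, ?_⟩
  unfold cellD
  rw [hrow]
  show (PySem.Str.pyGet? m[p.1.toNat] p.2).getD ' ' = ch
  rw [hch]
  rfl

-- A's walk equals: all closed-form positions in bounds AND the fetched characters equal the token
lemma checkGo_eq (m : List String) (d : Int × Int) :
    ∀ (cs : List Char) (o : Int × Int),
      (∀ p ∈ posList o d cs.length, inB (m.length : Int) p = true →
        p.2 < ((m.getD p.1.toNat "").toList.length : Int)) →
      checkGo m d cs o =
        ((posList o d cs.length).all (inB (m.length : Int)) &&
         decide ((posList o d cs.length).map (cellD m) = cs)) := by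
  intro cs
  induction cs with
  | nil => intro o _; simp [checkGo, posList]
  | cons c rest ih =>
    intro o hsafe
    have hhead := hsafe o (by rw [List.length_cons, posList_succ]; exact List.mem_cons_self)
    have htail : ∀ p ∈ posList (o.1 + d.1, o.2 + d.2) d rest.length,
        inB (m.length : Int) p = true → p.2 < ((m.getD p.1.toNat "").toList.length : Int) := by
      intro p hp
      exact hsafe p (by rw [List.length_cons, posList_succ]; exact List.mem_cons_of_mem _ hp)
    simp only [List.length_cons, posList_succ, List.all_cons, List.map_cons]
    by_cases hb : inB (m.length : Int) o = true
    · obtain ⟨row, ch, hrow, hch, hcell⟩ := cell_some m o (hhead hb) hb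
      have hch' : PySem.List.pyGet? row.toList o.2 = some ch := by
        simpa [PySem.Str.pyGet?] using hch
      have hA : checkGo m d (c :: rest) o =
          (if ch = c then checkGo m d rest (o.1 + d.1, o.2 + d.2) else false) := by
        simp [checkGo, within_eq_inB, hb, hrow, hch']
      rw [hA, hb, hcell]
      by_cases hc : ch = c
      · simp [hc, ih _ htail]
      · simp [hc]
    · simp only [Bool.not_eq_true] at hb
      have hA : checkGo m d (c :: rest) o = false := by
        simp [checkGo, within_eq_inB, hb]
      rw [hA, hb]
      simp

lemma check_alt_eq (m : List String) (o d : Int × Int) (token : String) :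
    check_alt m o d token =
      ((posList o d token.toList.length).all (inB (m.length : Int)) &&
       decide ((posList o d token.toList.length).map (cellD m) = token.toList)) := by
  unfold check_alt
  rw [show ((List.range token.toList.length).map
      (fun (i : Nat) => (o.1 + (i : Int) * d.1, o.2 + (i : Int) * d.2))) = posList o d token.toList.length from rfl]
  have hiff : ∀ l : List Char, (String.ofList l = token) ↔ (l = token.toList) := by
    intro l
    constructor
    · intro h; have := congrArg String.toList h; simpa using this
    · intro h; subst h; simp
  by_cases ha : (posList o d token.toList.length).any
      (fun p => !(decide (0 ≤ p.1) && decide (p.1 < (m.length : Int)) &&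
        decide (0 ≤ p.2) && decide (p.2 < (m.length : Int)))) = true
  · rw [if_pos ha]
    have hall : (posList o d token.toList.length).all (inB (m.length : Int)) = false := by
      rw [List.all_eq_false]
      simp only [List.any_eq_true, Bool.not_eq_true'] at ha
      obtain ⟨p, hp, hf⟩ := ha
      exact ⟨p, hp, by simp [inB, hf]⟩
    rw [hall, Bool.false_and]
  · rw [if_neg ha]
    have hall : (posList o d token.toList.length).all (inB (m.length : Int)) = true := by
      simp only [List.any_eq_true, not_exists, not_and, Bool.not_eq_true, Bool.not_eq_false']
        at ha
      rw [List.all_eq_true]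
      intro p hp
      simpa [inB] using ha p hp
    rw [hall, Bool.true_and, decide_eq_decide]
    exact hiff _

-- ===== VERDICT (by name: the statement is the Claim_ definition above) =====
theorem check_spec : Claim_equal_check := by
  intro m o d token _hdom hpre
  unfold Spec_check check
  have hsafe : ∀ p ∈ posList o d token.toList.length, inB (m.length : Int) p = true →
      p.2 < ((m.getD p.1.toNat "").toList.length : Int) := by
    intro p hp hb
    unfold posList at hp
    rw [List.mem_map] at hp
    obtain ⟨i, hi, rfl⟩ := hp
    rw [List.mem_range] at hi
    unfold inB at hb
    simp only [Bool.and_eq_true, decide_eq_true_eq] at hb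
    exact hpre i hi ⟨hb.1.1.1, hb.1.1.2, hb.1.2, hb.2⟩
  rw [checkGo_eq m d token.toList o hsafe, check_alt_eq]
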